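-- pv_equiv track=rewrite | github.com/banroku/fiber_length_analysis | script/run_inspection_rayleigh_000.py | _disk_offsets
-- ===== SOURCE A (Python) =====
-- from typing import Dict, List, Tuple
--
-- Pixel = Tuple[int, int]
--
-- def _disk_offsets(radius: int) -> List[Pixel]:
--     r = int(radius)
--     if r <= 0:
--         return [(0, 0)]
--     out: List[Pixel] = []
--     rr2 = r * r
--     for dr in range(-r, r + 1):
--         for dc in range(-r, r + 1):
--             if dr * dr + dc * dc <= rr2:
--                 out.append((dr, dc))
--     return out
-- ===== SOURCE B (Python) =====
-- import math
-- from typing import List, Tuple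
--
-- Pixel = Tuple[int, int]
--
-- def _disk_offsets(radius: int) -> List[Pixel]:
--     r = int(radius)
--     if r <= 0:
--         return [(0, 0)]
--     rr2 = r * r
--     half: List[List[Pixel]] = []  # rows dr = 0 .. r, each a contiguous run
--     for dr in range(r + 1):
--         c = math.isqrt(rr2 - dr * dr)
--         half.append([(dr, dc) for dc in range(-c, c + 1)])
--     out: List[Pixel] = []
--     for row in reversed(half[1:]):          # mirrored rows dr = -r .. -1
--         out.extend((-dr, dc) for (dr, dc) in row)
--     for row in half:                         # rows dr = 0 .. r
--         out.extend(row)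
--     return out
-- ===== Notes on version B (the rewrite author's own statement) =====
-- stated objective: alternative
-- what changed: Replaces the nested scan that tests dr*dr+dc*dc<=r*r on every cell of the (2r+1)^2 square by closed-form rows: each row's half-width is math.isqrt(rr2-dr*dr), rows are built only for dr=0..r and the negative rows are obtained by mirroring, so the per-cell membership test disappears.
import Mathlib
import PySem

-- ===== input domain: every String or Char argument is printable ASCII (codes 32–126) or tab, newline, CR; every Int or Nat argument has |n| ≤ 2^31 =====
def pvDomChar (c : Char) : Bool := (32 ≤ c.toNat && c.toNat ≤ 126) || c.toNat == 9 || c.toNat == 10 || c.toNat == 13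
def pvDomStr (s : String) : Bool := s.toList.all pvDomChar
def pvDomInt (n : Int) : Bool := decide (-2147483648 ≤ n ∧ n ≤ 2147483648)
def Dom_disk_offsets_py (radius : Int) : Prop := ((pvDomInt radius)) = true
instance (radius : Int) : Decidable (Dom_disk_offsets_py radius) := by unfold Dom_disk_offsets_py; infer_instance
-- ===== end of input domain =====

-- B builds each row as a closed-form contiguous run (integer-sqrt half-width) and mirrors
-- the upper half rows, instead of testing dr*dr+dc*dc <= r*r on every cell; objective: alternative.

-- ===== PORT A =====
def disk_offsets_py (radius : Int) : List (Int × Int) :=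
  let r := radius
  if r ≤ 0 then [(0, 0)]
  else
    let rr2 := r * r
    (PySem.List.pyRange (-r) (r + 1) 1).foldl (fun out dr =>
      (PySem.List.pyRange (-r) (r + 1) 1).foldl (fun out dc =>
        if dr * dr + dc * dc ≤ rr2 then out ++ [(dr, dc)] else out) out) []

-- ===== PORT B =====
-- math.isqrt n for n ≥ 0 (exact there; B only calls it with a nonnegative argument)
def pyIsqrt (n : Int) : Int := (Nat.sqrt n.toNat : Int)

def disk_offsets_py_alt (radius : Int) : List (Int × Int) :=
  let r := radius
  if r ≤ 0 then [(0, 0)]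
  else
    let rr2 := r * r
    -- rows dr = 0 .. r, each a contiguous run
    let half : List (List (Int × Int)) :=
      (PySem.List.pyRange 0 (r + 1) 1).foldl (fun half dr =>
        let c := pyIsqrt (rr2 - dr * dr)
        half ++ [(PySem.List.pyRange (-c) (c + 1) 1).map (fun dc => (dr, dc))]) []
    -- mirrored rows dr = -r .. -1
    let out : List (Int × Int) :=
      ((half.drop 1).reverse).foldl (fun out row =>
        out ++ row.map (fun p => (-p.1, p.2))) []
    half.foldl (fun out row => out ++ row) out

-- ===== PRECONDITION & SPEC =====
def Spec_disk_offsets_py (radius : Int) (out : List (Int × Int)) : Prop := out = disk_offsets_py_alt radius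
instance (radius : Int) (out : List (Int × Int)) : Decidable (Spec_disk_offsets_py radius out) := by unfold Spec_disk_offsets_py; infer_instance

-- ===== CLAIM (what is proved, stated in full; the proofs are below) =====
def Claim_equal_disk_offsets_py : Prop := ∀ (radius : Int), Dom_disk_offsets_py radius → Spec_disk_offsets_py radius (disk_offsets_py radius)

-- ===== LEMMAS AND PROOFS =====

-- half-width of row dr, and row dr itself (B's building blocks)
def rowC (r dr : Int) : Int := pyIsqrt (r * r - dr * dr)

def rowB (r dr : Int) : List (Int × Int) :=
  (PySem.List.pyRange (-(rowC r dr)) (rowC r dr + 1) 1).map (fun dc => (dr, dc))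

theorem sqrt_sq_le (n : Nat) : Nat.sqrt n * Nat.sqrt n ≤ n := by
  have := Nat.sqrt_le' n; rwa [pow_two] at this

theorem rowC_nonneg (r dr : Int) : 0 ≤ rowC r dr := by
  simp [rowC, pyIsqrt]

theorem rowC_le (r dr : Int) (h : 0 < r) : rowC r dr ≤ r := by
  simp only [rowC, pyIsqrt]
  set s := Nat.sqrt (r * r - dr * dr).toNat with hs
  have h2 : ((s * s : Nat) : Int) ≤ ((r * r - dr * dr).toNat : Int) := by
    exact_mod_cast sqrt_sq_le _
  have h3 : ((r * r - dr * dr).toNat : Int) ≤ r * r := by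
    have := mul_self_nonneg dr
    have := mul_self_nonneg r
    omega
  push_cast at h2
  nlinarith [Int.natCast_nonneg s]

theorem rowC_mem_iff (r dr dc : Int) (hd : dr * dr ≤ r * r) :
    (dr * dr + dc * dc ≤ r * r) ↔ (-(rowC r dr) ≤ dc ∧ dc ≤ rowC r dr) := by
  simp only [rowC, pyIsqrt]
  set s := Nat.sqrt (r * r - dr * dr).toNat with hs
  have habs : ((dc.natAbs * dc.natAbs : Nat) : Int) = dc * dc := by
    push_cast; exact abs_mul_abs_self dc
  have key : dc.natAbs ≤ s ↔ dc.natAbs * dc.natAbs ≤ (r * r - dr * dr).toNat := Nat.le_sqrt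
  have hs2 : ((s * s : Nat) : Int) ≤ r * r - dr * dr := by
    have h1 : s * s ≤ (r * r - dr * dr).toNat := sqrt_sq_le _
    omega
  omega

theorem rowC_neg (r dr : Int) : rowC r (-dr) = rowC r dr := by
  simp [rowC]

theorem rowB_neg (r dr : Int) :
    rowB r (-dr) = (rowB r dr).map (fun p => (-p.1, p.2)) := by
  simp [rowB, rowC_neg]

-- 'for x in l: out += g(x)' builds acc ++ flatMap, given the body extends by g x on members
theorem foldl_eq_flatMap {A B : Type} (l : List A) (F : List B → A → List B) (g : A → List B)
    (h : ∀ acc x, x ∈ l → F acc x = acc ++ g x) (acc : List B) :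
    l.foldl F acc = acc ++ l.flatMap g := by
  induction l generalizing acc with
  | nil => simp
  | cons y ys ih =>
    rw [List.foldl_cons, h acc y (List.mem_cons_self), ih (fun a x hx => h a x (List.mem_cons_of_mem _ hx))]
    simp

-- 'for x in l: if P x: out.append(f x)' builds acc ++ (filter).map
theorem foldl_ite_append {α β : Type} (P : α → Prop) [DecidablePred P] (f : α → β)
    (l : List α) (acc : List β) :
    l.foldl (fun a x => if P x then a ++ [f x] else a) acc
      = acc ++ (l.filter (fun x => decide (P x))).map f := by
  induction l generalizing acc with
  | nil => simp
  | cons y ys ih =>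
    by_cases hy : P y
    · simp [hy, ih]
    · simp [hy, ih]

-- A's inner row equals B's closed-form run
theorem filter_row (r dr : Int) (h : 0 < r) (hd : -r ≤ dr) (hd2 : dr ≤ r) :
    ((PySem.List.pyRange (-r) (r + 1) 1).filter
        (fun dc => decide (dr * dr + dc * dc ≤ r * r))).map (fun dc => (dr, dc)) = rowB r dr := by
  have hdd : dr * dr ≤ r * r := by nlinarith
  have hc0 := rowC_nonneg r dr
  have hcr := rowC_le r dr h
  rw [PySem.List.pyRange_one_append (-r) (-(rowC r dr)) (r + 1) (by omega) (by omega),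
      PySem.List.pyRange_one_append (-(rowC r dr)) (rowC r dr + 1) (r + 1) (by omega) (by omega)]
  rw [List.filter_append, List.filter_append]
  have h1 : (PySem.List.pyRange (-r) (-(rowC r dr)) 1).filter
      (fun dc => decide (dr * dr + dc * dc ≤ r * r)) = [] := by
    rw [List.filter_eq_nil_iff]
    intro x hx
    rw [PySem.List.mem_pyRange_one] at hx
    simp only [decide_eq_true_eq]
    rw [rowC_mem_iff r dr x hdd]
    omega
  have h2 : (PySem.List.pyRange (-(rowC r dr)) (rowC r dr + 1) 1).filter
      (fun dc => decide (dr * dr + dc * dc ≤ r * r))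
      = PySem.List.pyRange (-(rowC r dr)) (rowC r dr + 1) 1 := by
    rw [List.filter_eq_self]
    intro x hx
    rw [PySem.List.mem_pyRange_one] at hx
    simp only [decide_eq_true_eq]
    rw [rowC_mem_iff r dr x hdd]
    omega
  have h3 : (PySem.List.pyRange (rowC r dr + 1) (r + 1) 1).filter
      (fun dc => decide (dr * dr + dc * dc ≤ r * r)) = [] := by
    rw [List.filter_eq_nil_iff]
    intro x hx
    rw [PySem.List.mem_pyRange_one] at hx
    simp only [decide_eq_true_eq]
    rw [rowC_mem_iff r dr x hdd]
    omega
  rw [h1, h2, h3]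
  simp [rowB]

-- the negative index range is the mirrored-reversed positive one
theorem pyRange_neg_part (r : Int) (h : 0 < r) :
    PySem.List.pyRange (-r) 0 1 = ((PySem.List.pyRange 1 (r + 1) 1).reverse).map Neg.neg := by
  apply List.ext_getElem
  · simp [PySem.List.length_pyRange_one]
  · intro k h1 h2
    simp only [List.getElem_map, List.getElem_reverse,
      PySem.List.length_pyRange_one, PySem.List.getElem_pyRange_one]
    simp only [PySem.List.length_pyRange_one] at h1 h2
    omega

-- A as a flatMap of B's rows
theorem A_flatMap (r : Int) (h : 0 < r) :
    disk_offsets_py r = (PySem.List.pyRange (-r) (r + 1) 1).flatMap (fun dr => rowB r dr) := by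
  simp only [disk_offsets_py, if_neg (not_le.mpr h)]
  rw [foldl_eq_flatMap _ _ (fun dr => rowB r dr) ?_ [], List.nil_append]
  intro acc dr hdr
  rw [PySem.List.mem_pyRange_one] at hdr
  rw [foldl_ite_append (fun dc => dr * dr + dc * dc ≤ r * r) (fun dc => (dr, dc))]
  rw [filter_row r dr h (by omega) (by omega)]

-- B as the mirrored half followed by the half
theorem B_flatMap (r : Int) (h : 0 < r) :
    disk_offsets_py_alt r
      = ((PySem.List.pyRange 1 (r + 1) 1).reverse).flatMap
          (fun dr => (rowB r dr).map (fun p => (-p.1, p.2)))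
        ++ (PySem.List.pyRange 0 (r + 1) 1).flatMap (fun dr => rowB r dr) := by
  simp only [disk_offsets_py_alt, if_neg (not_le.mpr h)]
  have hhalf : (PySem.List.pyRange 0 (r + 1) 1).foldl (fun half dr =>
      half ++ [(PySem.List.pyRange (-(pyIsqrt (r * r - dr * dr))) (pyIsqrt (r * r - dr * dr) + 1) 1).map
        (fun dc => (dr, dc))]) []
      = (PySem.List.pyRange 0 (r + 1) 1).map (fun dr => rowB r dr) := by
    rw [PySem.List.foldl_append_singleton_eq_map]
    rfl
  rw [hhalf]
  rw [PySem.List.foldl_append_eq_flatMap, PySem.List.foldl_append_eq_flatMap, List.nil_append]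
  rw [PySem.List.pyRange_one_cons (by omega : (0:Int) < r + 1), List.map_cons, List.drop_one,
      List.tail_cons, ← List.map_reverse, List.flatMap_map]
  simp only [List.flatMap_cons, List.flatMap_map]
  norm_num

-- ===== VERDICT (by name: the statement is the Claim_ definition above) =====
theorem disk_offsets_py_spec : Claim_equal_disk_offsets_py := by
  intro radius _
  unfold Spec_disk_offsets_py
  by_cases h : radius ≤ 0
  · simp only [disk_offsets_py, disk_offsets_py_alt, if_pos h]
  · have h : 0 < radius := by omega
    rw [A_flatMap radius h, B_flatMap radius h]
    rw [PySem.List.pyRange_one_append (-radius) 0 (radius + 1) (by omega) (by omega)]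
    rw [List.flatMap_append]
    congr 1
    rw [pyRange_neg_part radius h, List.flatMap_map]
    apply List.flatMap_congr
    intro dr _
    exact rowB_neg radius dr
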